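-- pv_equiv track=rewrite | github.com/MarciovsRocha/Racioc-nio_Algor-timico | Prova-02/q3.py | aloca_matriz
-- ===== SOURCE A (Python) =====
-- def aloca_matriz(n,m):
--     if ((n <=0) or (m<=0)):
--         return nil
--     matriz = []
--     for i in range(0,n):
--         linha = []
--         for j in range(0,m):
--             if (i == j):
--                 linha.append(1)
--             else:
--                 linha.append(0)
--         matriz.append(linha.copy())
--     return matriz
-- ===== SOURCE B (Python) =====
-- def aloca_matriz(n, m):
--     if n <= 0 or m <= 0:
--         raise ValueError("dimensions must be positive")
--     return _rows(n, m, [1] + [0] * (m - 1))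
--
-- def _rows(k, m, row):
--     # each successive row is the previous one shifted right by one, truncated to m
--     if k <= 0:
--         return []
--     return [row] + _rows(k - 1, m, ([0] + row)[:m])
-- ===== Notes on version B (the rewrite author's own statement) =====
-- stated objective: alternative
-- what changed: B builds only the first row explicitly and derives every subsequent row by shifting the previous row right by one ((([0]+row)[:m]), recursively, instead of A's nested loops with a per-entry i==j test.
import Mathlib
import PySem

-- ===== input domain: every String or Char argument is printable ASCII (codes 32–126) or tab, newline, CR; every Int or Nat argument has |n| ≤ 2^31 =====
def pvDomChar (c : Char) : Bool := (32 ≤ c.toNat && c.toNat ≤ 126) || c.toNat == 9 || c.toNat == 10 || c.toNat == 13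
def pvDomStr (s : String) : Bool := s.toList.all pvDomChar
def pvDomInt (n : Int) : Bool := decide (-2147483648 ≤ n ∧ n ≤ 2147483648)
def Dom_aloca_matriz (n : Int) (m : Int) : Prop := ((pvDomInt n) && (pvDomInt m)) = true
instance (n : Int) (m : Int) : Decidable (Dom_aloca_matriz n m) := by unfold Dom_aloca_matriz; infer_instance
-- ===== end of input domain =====

-- B builds only the first row and derives each next row by shifting the previous one
-- right by one (([0]+row)[:m], recursively); A fills every entry with an i==j test.

-- ===== PORT A =====
-- On n ≤ 0 or m ≤ 0 the Python returns the undefined name `nil` (NameError): outside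
-- Pre_, the port returns [] there.
def aloca_matriz (n : Int) (m : Int) : List (List Int) :=
  if n ≤ 0 ∨ m ≤ 0 then []
  else
    (PySem.List.pyRange 0 n 1).foldl
      (fun matriz i =>
        matriz ++ [(PySem.List.pyRange 0 m 1).foldl
          (fun linha j => linha ++ [if i == j then (1 : Int) else 0]) []])
      []

-- ===== PORT B =====
-- helper _rows: recursion on k (k > 0 at every call; `if k <= 0: return []` base case)
def pvRowsB (k : Int) (m : Int) (row : List Int) : List (List Int) :=
  if h : k ≤ 0 then []
  else row :: pvRowsB (k - 1) m (PySem.List.slice ((0 : Int) :: row) none (some m))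
termination_by k.toNat
decreasing_by omega

-- B raises ValueError on n ≤ 0 or m ≤ 0: outside Pre_, the port returns [] there.
def aloca_matriz_alt (n : Int) (m : Int) : List (List Int) :=
  if n ≤ 0 ∨ m ≤ 0 then []
  else pvRowsB n m ((1 : Int) :: PySem.List.pyRepeat [(0 : Int)] (m - 1))

-- ===== PRECONDITION & SPEC =====
-- Pre_ excludes exactly the inputs where A raises NameError (`return nil`): n ≤ 0 or m ≤ 0.
def Pre_aloca_matriz (n : Int) (m : Int) : Prop := 0 < n ∧ 0 < m
instance (n : Int) (m : Int) : Decidable (Pre_aloca_matriz n m) := by unfold Pre_aloca_matriz; infer_instance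
def pvWitness_aloca_matriz : Int × Int := (3, 2)
def Spec_aloca_matriz (n : Int) (m : Int) (out : List (List Int)) : Prop := out = aloca_matriz_alt n m
instance (n : Int) (m : Int) (out : List (List Int)) : Decidable (Spec_aloca_matriz n m out) := by unfold Spec_aloca_matriz; infer_instance

-- ===== CLAIM (what is proved, stated in full; the proofs are below) =====
def Claim_equal_aloca_matriz : Prop := ∀ (n : Int) (m : Int), Dom_aloca_matriz n m → Pre_aloca_matriz n m → Spec_aloca_matriz n m (aloca_matriz n m)

-- ===== LEMMAS AND PROOFS =====

-- canonical identity-pattern matrix over Nat dimensions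
def pvRow (i m : Nat) : List Int := (List.range m).map (fun j => if i = j then 1 else 0)
def pvMat (n m : Nat) : List (List Int) := (List.range n).map (fun i => pvRow i m)

lemma inner_foldl (i m : Int) (hi : 0 ≤ i) :
    (PySem.List.pyRange 0 m 1).foldl
      (fun linha j => linha ++ [if i == j then (1 : Int) else 0]) []
      = pvRow i.toNat m.toNat := by
  rw [PySem.List.foldl_append_singleton_eq_map, PySem.List.pyRange_one]
  simp only [List.map_map, pvRow, List.nil_append, Int.sub_zero]
  apply List.map_congr_left
  intro k hk
  simp only [Function.comp_apply]
  by_cases h : i.toNat = k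
  · have h2 : i = 0 + (k : Int) := by omega
    simp [h, ← h2]
  · have h2 : ¬ i = (k : Int) := by omega
    simp [h, h2]

lemma portA_eq (n m : Int) (hn : 0 < n) (hm : 0 < m) :
    aloca_matriz n m = pvMat n.toNat m.toNat := by
  unfold aloca_matriz
  rw [if_neg (by omega)]
  rw [PySem.List.foldl_append_singleton_eq_map, PySem.List.pyRange_one 0 n]
  simp only [List.map_map, pvMat, List.nil_append, Int.sub_zero]
  apply List.map_congr_left
  intro k hk
  simp only [Function.comp_apply]
  rw [inner_foldl (0 + (k : Int)) m (by positivity)]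
  simp

lemma pvRow_length (i m : Nat) : (pvRow i m).length = m := by simp [pvRow]

-- shifting a row right by one and truncating to m gives the next row
lemma shift_row (i m : Nat) :
    PySem.List.slice ((0 : Int) :: pvRow i m) none (some (m : Int)) = pvRow (i + 1) m := by
  rw [PySem.List.slice_to_natCast]
  apply List.ext_getElem
  · simp [pvRow]
  · intro j h1 h2
    simp only [List.length_take, List.length_cons, pvRow_length] at h1
    have hj : j < m := by omega
    rw [List.getElem_take]
    match j, hj with
    | 0, _ => simp [pvRow]
    | t + 1, ht =>
      simp only [List.getElem_cons_succ, pvRow, List.getElem_map, List.getElem_range]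
      by_cases h : i = t
      · simp [h]
      · simp [h]

lemma rows_eq (m : Nat) (k : Nat) : ∀ (i : Nat),
    pvRowsB (k : Int) (m : Int) (pvRow i m)
      = (List.range k).map (fun t => pvRow (i + t) m) := by
  induction k with
  | zero => intro i; rw [pvRowsB]; simp
  | succ k ih =>
    intro i
    rw [pvRowsB, dif_neg (by omega)]
    have hk : ((k + 1 : Nat) : Int) - 1 = (k : Int) := by push_cast; ring
    rw [shift_row, hk, ih (i + 1), List.range_succ_eq_map, List.map_cons, List.map_map]
    simp only [Nat.add_zero]
    congr 1
    apply List.map_congr_left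
    intro t _
    simp only [Function.comp_apply]
    congr 1
    omega

lemma first_row (m : Int) (hm : 0 < m) :
    (1 : Int) :: PySem.List.pyRepeat [(0 : Int)] (m - 1) = pvRow 0 m.toNat := by
  rw [PySem.List.pyRepeat_singleton]
  apply List.ext_getElem
  · simp [pvRow]; omega
  · intro j h1 h2
    match j with
    | 0 => simp [pvRow]
    | t + 1 =>
      simp only [List.getElem_cons_succ, List.getElem_replicate, pvRow, List.getElem_map,
        List.getElem_range]
      simp

lemma portB_eq (n m : Int) (hn : 0 < n) (hm : 0 < m) :
    aloca_matriz_alt n m = pvMat n.toNat m.toNat := by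
  unfold aloca_matriz_alt
  rw [if_neg (by omega), first_row m hm]
  have hn' : n = ((n.toNat : Nat) : Int) := by omega
  have hm' : m = ((m.toNat : Nat) : Int) := by omega
  rw [hn', hm']
  simp only [Int.toNat_natCast]
  rw [rows_eq m.toNat n.toNat 0]
  simp [pvMat]

-- ===== VERDICT (by name: the statement is the Claim_ definition above) =====
theorem aloca_matriz_spec : Claim_equal_aloca_matriz := by
  intro n m _ hpre
  unfold Spec_aloca_matriz
  rw [portA_eq n m hpre.1 hpre.2, portB_eq n m hpre.1 hpre.2]
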